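-- pv_equiv track=rewrite | github.com/Uvaisbugh/Patterns_Python | q2_string_fl.py | solution_method
-- ===== SOURCE A (Python) =====
-- def solution_method(string):
-- 	# Manually split the string by '.'
-- 	words = []
-- 	word = ""
--
-- 	for char in string:
-- 		if char == ".":
-- 			words.append(word)  # Store word in list
-- 			words.append(".")  # Store '.' separately
-- 			word = ""  # Reset word
-- 		else:
-- 			word += char  # Append character to word
--
-- 	words.append(word)  # Append the last word
--
-- 	# Reverse the words manually
-- 	left, right = 0, len(words) - 1
-- 	while left < right:
-- 		words[left], words[right] = words[right], words[left]
-- 		left += 1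
-- 		right -= 1
--
-- 	# Manually join the words
-- 	result = ""
-- 	for w in words:
-- 		result += w
--
-- 	return result
-- ===== SOURCE B (Python) =====
-- def solution_method(string):
--     return '.'.join(string.split('.')[::-1])
-- ===== Notes on version B (the rewrite author's own statement) =====
-- stated objective: idiomatic
-- what changed: Replaces the hand-rolled character tokenizer that stores dot separators as explicit list elements, the in-place two-pointer reversal and the manual string-concatenation loop with a single expression: split on dots, reverse the segment list, join with dots.
import Mathlib
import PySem

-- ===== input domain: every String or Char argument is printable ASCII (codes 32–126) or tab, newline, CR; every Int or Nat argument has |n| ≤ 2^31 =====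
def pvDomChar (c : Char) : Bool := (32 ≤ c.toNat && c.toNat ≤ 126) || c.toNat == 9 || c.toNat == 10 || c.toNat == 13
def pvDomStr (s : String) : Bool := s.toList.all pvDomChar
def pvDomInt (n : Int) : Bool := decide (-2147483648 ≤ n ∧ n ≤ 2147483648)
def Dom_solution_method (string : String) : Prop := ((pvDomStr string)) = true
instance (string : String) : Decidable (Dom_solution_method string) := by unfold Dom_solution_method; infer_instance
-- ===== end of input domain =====

-- B replaces A's manual char-by-char tokenizer, in-place two-pointer reversal and manual
-- concatenation loop with a single split('.') / reverse / '.'-join expression (idiomatic).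


-- ===== PORT A =====
-- the two-pointer 'while left < right: swap; left += 1; right -= 1' loop, transliterated
def pvSwapLoop (ws : List (List Char)) (l r : Nat) : List (List Char) :=
  if l < r then
    pvSwapLoop ((ws.set l (ws.getD r [])).set r (ws.getD l [])) (l + 1) (r - 1)
  else ws
termination_by r - l

def solution_method (string : String) : String :=
  -- manual split on '.': fold over the characters carrying (words, word)
  let st := string.toList.foldl
    (fun (st : List (List Char) × List Char) c =>
      if c = '.' then (st.1 ++ [st.2, ['.']], ([] : List Char))
      else (st.1, st.2 ++ [c]))
    ([], [])
  let words := st.1 ++ [st.2]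
  -- reverse the words manually
  let words := pvSwapLoop words 0 (words.length - 1)
  -- manual join: result += w
  String.ofList (words.foldl (fun r w => r ++ w) [])

-- ===== PORT B =====
def solution_method_alt (string : String) : String :=
  String.ofList (PySem.Chars.join ['.'] ((PySem.Chars.splitOn string.toList ['.']).reverse))

-- ===== PRECONDITION & SPEC =====
def Spec_solution_method (string : String) (out : String) : Prop := out = solution_method_alt string
instance (string : String) (out : String) : Decidable (Spec_solution_method string out) := by unfold Spec_solution_method; infer_instance

-- ===== CLAIM (what is proved, stated in full; the proofs are below) =====
def Claim_equal_solution_method : Prop := ∀ (string : String), Dom_solution_method string → Spec_solution_method string (solution_method string)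

-- ===== LEMMAS AND PROOFS =====

-- splitting on '.', structurally (proof-side characterisation shared by both ports)
def pvSplit : List Char → List (List Char)
  | [] => [[]]
  | c :: rest => if c = '.' then [] :: pvSplit rest else (pvSplit rest).modifyHead (c :: ·)

theorem pvSplit_ne_nil (cs : List Char) : pvSplit cs ≠ [] := by
  induction cs with
  | nil => simp [pvSplit]
  | cons c rest ih =>
    simp only [pvSplit]
    split
    · simp
    · cases h : pvSplit rest with
      | nil => exact absurd h ih
      | cons p t => simp [List.modifyHead]

-- A's splitting fold produces the '.'-interspersed list of segments
theorem pvFold_eq (cs : List Char) : ∀ (ws : List (List Char)) (w : List Char),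
    (cs.foldl (fun (st : List (List Char) × List Char) c =>
      if c = '.' then (st.1 ++ [st.2, ['.']], ([] : List Char))
      else (st.1, st.2 ++ [c])) (ws, w)).1
    ++ [((cs.foldl (fun (st : List (List Char) × List Char) c =>
      if c = '.' then (st.1 ++ [st.2, ['.']], ([] : List Char))
      else (st.1, st.2 ++ [c])) (ws, w))).2]
    = ws ++ List.intersperse ['.'] ((pvSplit cs).modifyHead (w ++ ·)) := by
  induction cs with
  | nil => intro ws w; simp [pvSplit, List.modifyHead]
  | cons c rest ih =>
    intro ws w
    by_cases hc : c = '.'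
    · subst hc
      simp only [List.foldl_cons, if_pos rfl]
      rw [ih]
      cases h : pvSplit rest with
      | nil => exact absurd h (pvSplit_ne_nil rest)
      | cons p t =>
        simp [pvSplit, h, List.modifyHead, List.intersperse, List.append_assoc]
    · simp only [List.foldl_cons, if_neg hc]
      rw [ih]
      cases h : pvSplit rest with
      | nil => exact absurd h (pvSplit_ne_nil rest)
      | cons p t =>
        simp [pvSplit, if_neg hc, h, List.modifyHead, List.append_assoc]

theorem pvGetD_append_len_add {α : Type} (pre l : List α) (i : Nat) (d : α) :
    (pre ++ l).getD (pre.length + i) d = l.getD i d := by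
  induction pre with
  | nil => simp
  | cons x t ih => simpa [Nat.succ_add] using ih

theorem pvSet_append_len_add {α : Type} (pre l : List α) (i : Nat) (v : α) :
    (pre ++ l).set (pre.length + i) v = pre ++ l.set i v := by
  induction pre with
  | nil => simp
  | cons x t ih => simpa [Nat.succ_add] using ih

-- the two-pointer loop reverses the segment it is pointed at
theorem pvSwapLoop_eq : ∀ (n : Nat) (mid : List (List Char)), mid.length ≤ n →
    ∀ (pre suf : List (List Char)),
    pvSwapLoop (pre ++ mid ++ suf) pre.length (pre.length + mid.length - 1)
    = pre ++ mid.reverse ++ suf := by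
  intro n
  induction n with
  | zero =>
    intro mid h pre suf
    have : mid = [] := List.eq_nil_of_length_eq_zero (Nat.le_zero.mp h)
    subst this
    rw [pvSwapLoop, if_neg (by simp only [List.length_nil]; omega)]
    simp
  | succ n ih =>
    intro mid h pre suf
    rcases mid with _ | ⟨a, m1⟩
    · rw [pvSwapLoop, if_neg (by simp only [List.length_nil]; omega)]
      simp
    · rcases List.eq_nil_or_concat m1 with rfl | ⟨m, b, rfl⟩
      · rw [pvSwapLoop, if_neg (by simp only [List.length_cons, List.length_nil]; omega)]
        simp
      · -- mid = a :: (m ++ [b])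
        simp only [List.concat_eq_append] at h ⊢
        have hlen : (a :: (m ++ [b])).length = m.length + 2 := by simp
        have hr : pre.length + (a :: (m ++ [b])).length - 1 = pre.length + (m.length + 1) := by
          simp only [hlen]; omega
        have hassoc : pre ++ (a :: (m ++ [b])) ++ suf = pre ++ (a :: (m ++ (b :: suf))) := by
          simp [List.append_assoc]
        have hgetA : (pre ++ (a :: (m ++ (b :: suf)))).getD pre.length ([] : List Char) = a := by
          have := pvGetD_append_len_add pre (a :: (m ++ (b :: suf))) 0 ([] : List Char)
          simpa using this
        have hgetB : (pre ++ (a :: (m ++ (b :: suf)))).getD (pre.length + (m.length + 1))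
            ([] : List Char) = b := by
          rw [pvGetD_append_len_add pre (a :: (m ++ (b :: suf))) (m.length + 1)]
          show (m ++ (b :: suf)).getD m.length [] = b
          have := pvGetD_append_len_add m (b :: suf) 0 ([] : List Char)
          simpa using this
        have hset : ((pre ++ (a :: (m ++ (b :: suf)))).set pre.length b).set
            (pre.length + (m.length + 1)) a
            = (pre ++ [b]) ++ m ++ ([a] ++ suf) := by
          have h1 : (pre ++ (a :: (m ++ (b :: suf)))).set pre.length b
              = pre ++ (b :: (m ++ (b :: suf))) := by
            have := pvSet_append_len_add pre (a :: (m ++ (b :: suf))) 0 b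
            simpa using this
          rw [h1, pvSet_append_len_add pre (b :: (m ++ (b :: suf))) (m.length + 1) a]
          show pre ++ (b :: (m ++ (b :: suf)).set m.length a) = _
          have h2 : (m ++ (b :: suf)).set m.length a = m ++ (a :: suf) := by
            have := pvSet_append_len_add m (b :: suf) 0 a
            simpa using this
          rw [h2]; simp [List.append_assoc]
        rw [pvSwapLoop, if_pos (by simp only [hlen]; omega)]
        rw [hr, hassoc, hgetA, hgetB, hset]
        have hl1 : pre.length + 1 = (pre ++ [b]).length := by simp
        have hlb : (pre ++ [b]).length = pre.length + 1 := by simp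
        have hr1 : pre.length + (m.length + 1) - 1 = (pre ++ [b]).length + m.length - 1 := by
          rw [hlb]; omega
        rw [hl1, hr1, ih m (by simp at h; omega) (pre ++ [b]) ([a] ++ suf)]
        simp [List.append_assoc]

theorem pvFlatten_eq (ws : List (List Char)) : ∀ (init : List Char),
    ws.foldl (fun r w => r ++ w) init = init ++ ws.flatten := by
  induction ws with
  | nil => simp
  | cons w ws ih => intro init; simp [List.foldl, ih, List.append_assoc]

theorem pvIntersperse_concat {α : Type} (s : α) :
    ∀ (l : List α) (x : α), l ≠ [] →
    List.intersperse s (l ++ [x]) = List.intersperse s l ++ [s, x] := by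
  intro l
  induction l with
  | nil => intro x h; exact absurd rfl h
  | cons h t ih =>
    intro x _
    cases t with
    | nil => simp [List.intersperse]
    | cons y zs =>
      have := ih x (by simp)
      simp only [List.cons_append, List.intersperse] at this ⊢
      rw [this]

theorem pvReverse_intersperse {α : Type} (s : α) :
    ∀ (l : List α), (List.intersperse s l).reverse = List.intersperse s l.reverse := by
  intro l
  induction l with
  | nil => simp
  | cons x t ih =>
    cases t with
    | nil => simp
    | cons y zs =>
      simp only [List.intersperse, List.reverse_cons] at ih ⊢
      rw [ih, List.append_assoc, pvIntersperse_concat s (zs.reverse ++ [y]) x (by simp)]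
      simp

-- PySem's fuel-based splitter computes pvSplit
theorem pvSplitOnGo_eq : ∀ (l : List Char) (fuel : Nat) (cur : List Char)
    (acc : List (List Char)), l.length < fuel →
    PySem.Chars.splitOn.go ['.'] fuel l cur acc
    = acc.reverse ++ (pvSplit l).modifyHead (cur.reverse ++ ·) := by
  intro l
  induction l with
  | nil =>
    intro fuel cur acc hf
    cases fuel with
    | zero => omega
    | succ f => simp [PySem.Chars.splitOn.go, pvSplit, List.modifyHead]
  | cons c rest ih =>
    intro fuel cur acc hf
    cases fuel with
    | zero => omega
    | succ f =>
      by_cases hc : c = '.'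
      · subst hc
        have hpre : (['.'] : List Char).isPrefixOf ('.' :: rest) = true := by
          simp [List.isPrefixOf]
        rw [PySem.Chars.splitOn.go, if_pos hpre]
        have : List.drop (['.'] : List Char).length ('.' :: rest) = rest := by simp
        rw [this, ih f [] (cur.reverse :: acc) (by simp at hf; omega)]
        cases h : pvSplit rest with
        | nil => exact absurd h (pvSplit_ne_nil rest)
        | cons p t => simp [pvSplit, h, List.modifyHead]
      · have hpre : (['.'] : List Char).isPrefixOf (c :: rest) = false := by
          simp [List.isPrefixOf]; exact fun h => hc h.symm
        rw [PySem.Chars.splitOn.go, if_neg (by simp [hpre])]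
        rw [ih f (c :: cur) acc (by simp at hf; omega)]
        cases h : pvSplit rest with
        | nil => exact absurd h (pvSplit_ne_nil rest)
        | cons p t => simp [pvSplit, if_neg hc, h, List.modifyHead]

theorem pvSplitOn_eq (cs : List Char) : PySem.Chars.splitOn cs ['.'] = pvSplit cs := by
  rw [PySem.Chars.splitOn, pvSplitOnGo_eq cs (cs.length + 1) [] [] (by omega)]
  cases h : pvSplit cs with
  | nil => exact absurd h (pvSplit_ne_nil cs)
  | cons p t => simp [List.modifyHead]

-- ===== VERDICT (by name: the statement is the Claim_ definition above) =====
theorem solution_method_spec : Claim_equal_solution_method := by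
  intro s _
  unfold Spec_solution_method solution_method solution_method_alt
  simp only []
  have hfold := pvFold_eq s.toList [] []
  have hwords : ((s.toList.foldl
      (fun (st : List (List Char) × List Char) c =>
        if c = '.' then (st.1 ++ [st.2, ['.']], ([] : List Char))
        else (st.1, st.2 ++ [c])) ([], [])).1
      ++ [(s.toList.foldl
      (fun (st : List (List Char) × List Char) c =>
        if c = '.' then (st.1 ++ [st.2, ['.']], ([] : List Char))
        else (st.1, st.2 ++ [c])) ([], [])).2])
      = List.intersperse ['.'] (pvSplit s.toList) := by
    rw [hfold]
    cases h : pvSplit s.toList with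
    | nil => exact absurd h (pvSplit_ne_nil s.toList)
    | cons p t => simp [List.modifyHead]
  rw [hwords]
  have hswap := pvSwapLoop_eq (List.intersperse ['.'] (pvSplit s.toList)).length
    (List.intersperse ['.'] (pvSplit s.toList)) (le_refl _) [] []
  simp only [List.nil_append, List.append_nil, List.length_nil, Nat.zero_add] at hswap
  rw [hswap, pvFlatten_eq, pvReverse_intersperse, pvSplitOn_eq]
  simp [PySem.Chars.join, List.intercalate]
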